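-- pv_equiv track=rewrite | github.com/RamananVr/Leetcodepython | strings/1869_Longer_Contiguous_Segments_of_Ones_than_Zeros.py | checkZeroOnes
-- ===== SOURCE A (Python) =====
-- def checkZeroOnes(s: str) -> bool:
--     max_ones = max_zeros = 0
--     current_ones = current_zeros = 0
--
--     for char in s:
--         if char == '1':
--             current_ones += 1
--             current_zeros = 0
--         else:
--             current_zeros += 1
--             current_ones = 0
--
--         max_ones = max(max_ones, current_ones)
--         max_zeros = max(max_zeros, current_zeros)
--
--     return max_ones > max_zeros
-- ===== SOURCE B (Python) =====
-- def checkZeroOnes(s: str) -> bool: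
--     # build maximal runs (key, length) first, then reduce
--     runs = []
--     i, n = 0, len(s)
--     while i < n:
--         k = s[i] == '1'
--         j = i + 1
--         while j < n and (s[j] == '1') == k:
--             j += 1
--         runs.append((k, j - i))
--         i = j
--     ones = max((ln for k, ln in runs if k), default=0)
--     zeros = max((ln for k, ln in runs if not k), default=0)
--     return ones > zeros
-- ===== Notes on version B (the rewrite author's own statement) =====
-- stated objective: alternative
-- what changed: B first materialises the maximal runs of equal key (char == '1') as a list of (key, length) pairs and then reduces them with max (default 0) per key, instead of A's online scan with four rolling counters and two max updates per character.
import Mathlib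
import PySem

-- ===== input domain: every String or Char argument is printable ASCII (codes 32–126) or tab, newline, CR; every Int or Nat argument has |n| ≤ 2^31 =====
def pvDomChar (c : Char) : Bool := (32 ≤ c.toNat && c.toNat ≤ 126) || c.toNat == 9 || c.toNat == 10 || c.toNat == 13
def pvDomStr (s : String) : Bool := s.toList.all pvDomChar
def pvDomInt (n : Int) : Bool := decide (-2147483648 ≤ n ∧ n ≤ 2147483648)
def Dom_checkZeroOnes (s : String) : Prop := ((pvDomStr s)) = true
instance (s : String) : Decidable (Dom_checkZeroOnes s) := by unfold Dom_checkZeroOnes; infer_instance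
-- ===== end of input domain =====

-- B builds the maximal runs (key, length) first and reduces them with max per key; same O(n) cost, different structure.

-- ===== PORT A =====
-- one loop step of A: update the current-run counters, then the maxima
def stepA (st : Nat × Nat × Nat × Nat) (c : Char) : Nat × Nat × Nat × Nat :=
  let mo := st.1; let mz := st.2.1; let co := st.2.2.1; let cz := st.2.2.2
  let cc : Nat × Nat := if c == '1' then (co + 1, 0) else (0, cz + 1)
  (max mo cc.1, max mz cc.2, cc.1, cc.2)

def checkZeroOnes (s : String) : Bool :=
  let st := s.toList.foldl stepA (0, 0, 0, 0)
  decide (st.1 > st.2.1)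

-- ===== PORT B =====
-- run-length grouping: the maximal runs of equal key (c == '1'), as (key, length)
def pvRuns (l : List Char) : List (Bool × Nat) :=
  match l with
  | [] => []
  | c :: cs =>
    ((c == '1'), (cs.takeWhile (fun d => (d == '1') == (c == '1'))).length + 1)
      :: pvRuns (cs.dropWhile (fun d => (d == '1') == (c == '1')))
termination_by l.length
decreasing_by
  simpa using Nat.lt_succ_of_le (List.Sublist.length_le (List.dropWhile_sublist _))

def checkZeroOnes_alt (s : String) : Bool :=
  let rs := pvRuns s.toList
  let ones : Nat := (rs.filter (fun p => p.1)).foldl (fun a p => max a p.2) 0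
  let zeros : Nat := (rs.filter (fun p => !p.1)).foldl (fun a p => max a p.2) 0
  decide (ones > zeros)

-- ===== PRECONDITION & SPEC =====
def Spec_checkZeroOnes (s : String) (out : Bool) : Prop := out = checkZeroOnes_alt s
instance (s : String) (out : Bool) : Decidable (Spec_checkZeroOnes s out) := by unfold Spec_checkZeroOnes; infer_instance

-- ===== CLAIM (what is proved, stated in full; the proofs are below) =====
def Claim_equal_checkZeroOnes : Prop := ∀ (s : String), Dom_checkZeroOnes s → Spec_checkZeroOnes s (checkZeroOnes s)

-- ===== LEMMAS AND PROOFS =====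

-- abbreviations for B's two reductions
def pvM1 (l : List Char) : Nat :=
  ((pvRuns l).filter (fun p => p.1)).foldl (fun a p => max a p.2) 0
def pvM0 (l : List Char) : Nat :=
  ((pvRuns l).filter (fun p => !p.1)).foldl (fun a p => max a p.2) 0

theorem foldl_max_shift (l : List (Bool × Nat)) (a : Nat) :
    l.foldl (fun acc p => max acc p.2) a = max a (l.foldl (fun acc p => max acc p.2) 0) := by
  induction l generalizing a with
  | nil => simp
  | cons p cs ih =>
    simp only [List.foldl_cons]
    rw [ih (max a p.2), ih (max 0 p.2)]
    omega

theorem head?_dropWhile_false {p : Char → Bool} :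
    ∀ (l : List Char) (c : Char), (l.dropWhile p).head? = some c → p c = false := by
  intro l
  induction l with
  | nil => simp
  | cons x xs ih =>
    intro c h
    by_cases hx : p x
    · exact ih c (by simpa [List.dropWhile_cons, hx] using h)
    · have hxc : x = c := by simpa [List.dropWhile_cons, hx] using h
      rw [← hxc]
      simpa using hx

-- a run of all-'1' characters, entered with the ones-counter already folded into the max
theorem run_true (pre : List Char) (h : ∀ d ∈ pre, (d == '1') = true) :
    ∀ mo mz co : Nat, co ≤ mo → pre.foldl stepA (mo, mz, co, 0) =
      (max mo (co + pre.length), mz, co + pre.length, 0) := by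
  induction pre with
  | nil => intro mo mz co hle; simp; omega
  | cons d ds ih =>
    intro mo mz co hle
    have hd : (d == '1') = true := h d (List.mem_cons_self ..)
    have hds : ∀ d ∈ ds, (d == '1') = true := fun x hx => h x (List.mem_cons_of_mem _ hx)
    simp only [List.foldl_cons, stepA, hd, if_true]
    rw [show (max mo (co+1, (0:Nat)).1, max mz (co+1, (0:Nat)).2, (co+1, (0:Nat)).1, (co+1, (0:Nat)).2)
        = (max mo (co+1), max mz 0, co+1, 0) from rfl]
    rw [ih hds (max mo (co+1)) (max mz 0) (co+1) (by omega)]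
    simp only [List.length_cons, Prod.mk.injEq]
    refine ⟨by omega, by omega, by omega, trivial⟩

-- a run of all-non-'1' characters, entered with the zeros-counter already folded into the max
theorem run_false (pre : List Char) (h : ∀ d ∈ pre, (d == '1') = false) :
    ∀ mo mz cz : Nat, cz ≤ mz → pre.foldl stepA (mo, mz, 0, cz) =
      (mo, max mz (cz + pre.length), 0, cz + pre.length) := by
  induction pre with
  | nil => intro mo mz cz hle; simp; omega
  | cons d ds ih =>
    intro mo mz cz hle
    have hd : (d == '1') = false := h d (List.mem_cons_self ..)
    have hds : ∀ d ∈ ds, (d == '1') = false := fun x hx => h x (List.mem_cons_of_mem _ hx)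
    simp only [List.foldl_cons, stepA, hd, Bool.false_eq_true, if_false]
    rw [show (max mo ((0:Nat), cz+1).1, max mz ((0:Nat), cz+1).2, ((0:Nat), cz+1).1, ((0:Nat), cz+1).2)
        = (max mo 0, max mz (cz+1), 0, cz+1) from rfl]
    rw [ih hds (max mo 0) (max mz (cz+1)) (cz+1) (by omega)]
    simp only [List.length_cons, Prod.mk.injEq]
    refine ⟨by omega, by omega, trivial, by omega⟩

theorem main_lemma : ∀ (n : Nat) (l : List Char), l.length ≤ n →
    ∀ mo mz co cz : Nat,
    (∀ c, l.head? = some c → ((c == '1') = true → co = 0) ∧ ((c == '1') = false → cz = 0)) →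
    (l.foldl stepA (mo, mz, co, cz)).1 = max mo (pvM1 l) ∧
    (l.foldl stepA (mo, mz, co, cz)).2.1 = max mz (pvM0 l) := by
  intro n
  induction n with
  | zero =>
    intro l hl mo mz co cz _
    have : l = [] := List.length_eq_zero_iff.mp (Nat.le_zero.mp hl)
    subst this
    simp [pvM1, pvM0, pvRuns]
  | succ n ih =>
    intro l hl mo mz co cz hhead
    match l with
    | [] => simp [pvM1, pvM0, pvRuns]
    | c :: cs =>
      set p : Char → Bool := fun d => (d == '1') == (c == '1') with hp
      set pre := cs.takeWhile p with hpre
      set rest := cs.dropWhile p with hrest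
      have hsplit : cs = pre ++ rest := (List.takeWhile_append_dropWhile).symm
      have hcs_len : cs.length = pre.length + rest.length := by rw [hsplit]; simp
      have hlen_rest : rest.length ≤ n := by
        simp only [List.length_cons] at hl; omega
      have hpre_key : ∀ d ∈ pre, (d == '1') = (c == '1') := by
        intro d hd
        have := List.mem_takeWhile_imp hd
        simpa [hp] using this
      have hrest_head : ∀ c', rest.head? = some c' → (c' == '1') ≠ (c == '1') := by
        intro c' h
        have := head?_dropWhile_false (p := p) cs c' (by rw [← hrest]; exact h)
        simp only [hp] at this
        intro hcontra
        rw [hcontra] at this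
        simp at this
      have hruns : pvRuns (c :: cs) = ((c == '1'), pre.length + 1) :: pvRuns rest := by
        rw [pvRuns]
      have hfold : (c :: cs).foldl stepA (mo, mz, co, cz)
          = rest.foldl stepA ((c :: pre).foldl stepA (mo, mz, co, cz)) := by
        conv_lhs => rw [show (c :: cs) = (c :: pre) ++ rest by rw [List.cons_append, ← hsplit]]
        rw [List.foldl_append]
      cases hk : (c == '1') with
      | true =>
        have hco : co = 0 := (hhead c rfl).1 hk
        have hallpre : ∀ d ∈ pre, (d == '1') = true := fun d hd => by rw [hpre_key d hd, hk]
        have hstep : (c :: pre).foldl stepA (mo, mz, co, cz)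
            = (max mo (pre.length + 1), max mz 0, pre.length + 1, 0) := by
          simp only [List.foldl_cons, stepA, hk, if_true, hco]
          rw [show (max mo ((0:Nat)+1, (0:Nat)).1, max mz ((0:Nat)+1, (0:Nat)).2, ((0:Nat)+1, (0:Nat)).1, ((0:Nat)+1, (0:Nat)).2)
              = (max mo 1, max mz 0, 1, 0) from rfl]
          rw [run_true pre hallpre (max mo 1) (max mz 0) 1 (by omega)]
          simp only [Prod.mk.injEq]
          refine ⟨by omega, trivial, by omega, trivial⟩
        have hrest_cond : ∀ c', rest.head? = some c' →
            ((c' == '1') = true → pre.length + 1 = 0) ∧ ((c' == '1') = false → (0:Nat) = 0) := by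
          intro c' h
          refine ⟨fun hcontra => absurd (hcontra.trans hk.symm) (hrest_head c' h), fun _ => rfl⟩
        have hih := ih rest hlen_rest (max mo (pre.length + 1)) (max mz 0) (pre.length + 1) 0 hrest_cond
        rw [hfold, hstep]
        have hm1 : pvM1 (c :: cs) = max (pre.length + 1) (pvM1 rest) := by
          simp only [pvM1, hruns, hk]
          rw [List.filter_cons_of_pos rfl, List.foldl_cons, foldl_max_shift]
          omega
        have hm0 : pvM0 (c :: cs) = pvM0 rest := by
          simp only [pvM0, hruns, hk]
          rw [List.filter_cons_of_neg (by simp)]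
        rw [hm1, hm0]
        exact ⟨by rw [hih.1]; omega, by rw [hih.2]; omega⟩
      | false =>
        have hcz : cz = 0 := (hhead c rfl).2 hk
        have hallpre : ∀ d ∈ pre, (d == '1') = false := fun d hd => by rw [hpre_key d hd, hk]
        have hstep : (c :: pre).foldl stepA (mo, mz, co, cz)
            = (max mo 0, max mz (pre.length + 1), 0, pre.length + 1) := by
          simp only [List.foldl_cons, stepA, hk, Bool.false_eq_true, if_false, hcz]
          rw [show (max mo ((0:Nat), (0:Nat)+1).1, max mz ((0:Nat), (0:Nat)+1).2, ((0:Nat), (0:Nat)+1).1, ((0:Nat), (0:Nat)+1).2)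
              = (max mo 0, max mz 1, 0, 1) from rfl]
          rw [run_false pre hallpre (max mo 0) (max mz 1) 1 (by omega)]
          simp only [Prod.mk.injEq]
          refine ⟨trivial, by omega, trivial, by omega⟩
        have hrest_cond : ∀ c', rest.head? = some c' →
            ((c' == '1') = true → (0:Nat) = 0) ∧ ((c' == '1') = false → pre.length + 1 = 0) := by
          intro c' h
          refine ⟨fun _ => rfl, fun hcontra => absurd (hcontra.trans hk.symm) (hrest_head c' h)⟩
        have hih := ih rest hlen_rest (max mo 0) (max mz (pre.length + 1)) 0 (pre.length + 1) hrest_cond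
        rw [hfold, hstep]
        have hm0 : pvM0 (c :: cs) = max (pre.length + 1) (pvM0 rest) := by
          simp only [pvM0, hruns, hk]
          rw [List.filter_cons_of_pos rfl, List.foldl_cons, foldl_max_shift]
          omega
        have hm1 : pvM1 (c :: cs) = pvM1 rest := by
          simp only [pvM1, hruns, hk]
          rw [List.filter_cons_of_neg (by simp)]
        rw [hm1, hm0]
        exact ⟨by rw [hih.1]; omega, by rw [hih.2]; omega⟩

-- ===== VERDICT (by name: the statement is the Claim_ definition above) =====
theorem checkZeroOnes_spec : Claim_equal_checkZeroOnes := by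
  intro s _
  unfold Spec_checkZeroOnes
  have h := main_lemma s.toList.length s.toList (Nat.le_refl _) 0 0 0 0
    (fun c _ => ⟨fun _ => rfl, fun _ => rfl⟩)
  simp only [checkZeroOnes, checkZeroOnes_alt, h.1, h.2, Nat.zero_max, pvM1, pvM0]
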